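-- pv_equiv track=rewrite | github.com/Swapnil05Rai/gfgpotd | evenswap.py | lexicographicallyLargest
-- ===== SOURCE A (Python) =====
-- def lexicographicallyLargest(a, n):
--     i, j = 0, 0
--     while i < n:
--         while j < n and a[j]&1 == a[i]&1:
--             j += 1
--         a[i:j] = sorted(a[i:j], reverse=True)
--         i = j
--     return a
-- ===== SOURCE B (Python) =====
-- def lexicographicallyLargest(a, n):
--     done, run = [], []
--     for k in range(n):
--         x = a[k]
--         if run and (run[0] & 1) != (x & 1):
--             done += run
--             run = []
--         i = 0
--         while i < len(run) and run[i] >= x: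
--             i += 1
--         run.insert(i, x)
--     out = done + run
--     a[:len(out)] = out
--     return a
-- ===== Notes on version B (the rewrite author's own statement) =====
-- stated objective: alternative
-- what changed: Replaces A's two-index boundary scan plus per-run sorted() slice assignment by a single online pass that keeps the current parity run sorted descending via insertion (insert each element before the first smaller one), flushing the run when parity flips; no run boundaries or sort calls.
import Mathlib
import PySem

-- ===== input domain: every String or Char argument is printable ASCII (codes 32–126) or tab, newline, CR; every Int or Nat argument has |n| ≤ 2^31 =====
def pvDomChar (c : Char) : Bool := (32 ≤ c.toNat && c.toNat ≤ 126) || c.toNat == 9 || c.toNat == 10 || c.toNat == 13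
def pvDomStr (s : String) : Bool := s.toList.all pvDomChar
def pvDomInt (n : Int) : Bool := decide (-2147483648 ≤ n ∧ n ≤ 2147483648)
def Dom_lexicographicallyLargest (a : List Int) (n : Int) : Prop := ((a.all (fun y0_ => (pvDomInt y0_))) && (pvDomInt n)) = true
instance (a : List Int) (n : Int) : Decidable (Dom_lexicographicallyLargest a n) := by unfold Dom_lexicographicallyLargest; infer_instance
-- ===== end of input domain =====

-- B replaces A's two-index boundary scan + per-run sorted() slice assignment by a single
-- online pass: the current parity run is kept sorted descending by insertion and flushed
-- when parity flips; objective: alternative. Both A and B mutate `a` in place identically;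
-- the theorem is about the return value.


-- ===== PORT A =====
-- x & 1 on a Python int equals x % 2 (floor mod); exact for every Int, negatives included
def pvAnd1 (x : Int) : Int := PySem.Int.mod x 2

-- sorted(g, reverse=True)
def pvSortDesc (g : List Int) : List Int := PySem.List.sorted g (fun x => x) true

-- inner loop: while j < n and a[j]&1 == a[i]&1: j += 1
-- (fuel only makes the loop total; a[j] out of range is a Python IndexError, excluded by Pre_)
def pvFindJ (a : List Int) (n p : Int) : Nat → Int → Int
  | 0, j => j
  | fuel+1, j =>
    if j < n then
      match PySem.List.pyGet? a j with
      | some v => if pvAnd1 v == p then pvFindJ a n p fuel (j+1) else j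
      | none => j
    else j

-- outer loop: while i < n: find j; a[i:j] = sorted(a[i:j], reverse=True); i = j
-- the slice assignment a[i:j] = … is take i ++ … ++ drop j (exact for the reachable 0 ≤ i ≤ j)
def pvOuter (n : Int) : Nat → List Int → Int → List Int
  | 0, a, _ => a
  | fuel+1, a, i =>
    if i < n then
      match PySem.List.pyGet? a i with
      | none => a   -- Python raises IndexError here (outside Pre_)
      | some v =>
        let j := pvFindJ a n (pvAnd1 v) (a.length + 1) i
        let a' := a.take i.toNat ++ pvSortDesc (PySem.List.slice a (some i) (some j)) ++ a.drop j.toNat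
        pvOuter n fuel a' j
    else a

def lexicographicallyLargest (a : List Int) (n : Int) : List Int :=
  pvOuter n (a.length + 1) a 0

-- ===== PORT B =====
-- the inner while loop: walk over run while run[i] >= x, insert x there (before the first smaller)
def pvInsertDesc (x : Int) : List Int → List Int
  | [] => [x]
  | y :: ys => if x ≤ y then y :: pvInsertDesc x ys else x :: y :: ys

-- one loop body: flush the run if the parity flips, then insert x into the run
def pvStep (s : List Int × List Int) (x : Int) : List Int × List Int :=
  let s' := match s.2 with
    | [] => s
    | r0 :: _ => if pvAnd1 r0 ≠ pvAnd1 x then (s.1 ++ s.2, []) else s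
  (s'.1, pvInsertDesc x s'.2)

def lexicographicallyLargest_alt (a : List Int) (n : Int) : List Int :=
  -- for k in range(n): x = a[k]; …   (pyGetD is exact under Pre_: every index in range)
  let pre := (PySem.List.pyRange 0 n 1).map (fun k => PySem.List.pyGetD a k 0)
  let s := pre.foldl pvStep ([], [])
  let out := s.1 ++ s.2
  -- a[:len(out)] = out
  out ++ a.drop out.length

-- ===== PRECONDITION & SPEC =====
-- Pre_ excludes exactly the inputs where A raises IndexError: n beyond the length of a.
def Pre_lexicographicallyLargest (a : List Int) (n : Int) : Prop := n ≤ (a.length : Int)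
instance (a : List Int) (n : Int) : Decidable (Pre_lexicographicallyLargest a n) := by unfold Pre_lexicographicallyLargest; infer_instance
def pvWitness_lexicographicallyLargest : List Int × Int := ([5, 1, 3, 2, 8, 7], 6)

def Spec_lexicographicallyLargest (a : List Int) (n : Int) (out : List Int) : Prop := out = lexicographicallyLargest_alt a n
instance (a : List Int) (n : Int) (out : List Int) : Decidable (Spec_lexicographicallyLargest a n out) := by unfold Spec_lexicographicallyLargest; infer_instance

-- ===== CLAIM (what is proved, stated in full; the proofs are below) =====
def Claim_equal_lexicographicallyLargest : Prop := ∀ (a : List Int) (n : Int), Dom_lexicographicallyLargest a n → Pre_lexicographicallyLargest a n → Spec_lexicographicallyLargest a n (lexicographicallyLargest a n)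

-- ===== LEMMAS AND PROOFS =====

-- proof-side characterisation of both programs: the maximal consecutive same-parity runs
def pvGroups : List Int → List (List Int)
  | [] => []
  | x :: xs =>
    (x :: xs.takeWhile (fun y => pvAnd1 y == pvAnd1 x)) ::
      pvGroups (xs.dropWhile (fun y => pvAnd1 y == pvAnd1 x))
termination_by l => l.length
decreasing_by simpa using Nat.lt_succ_of_le (List.length_dropWhile_le _ _)

lemma findJ_spec (n p : Int) : ∀ (fuel : Nat) (r u : List Int), u.length < fuel →
    pvFindJ (r ++ u) n p fuel (r.length : Int)
      = (r.length : Int) + ((u.take (n - r.length).toNat).takeWhile (fun y => pvAnd1 y == p)).length := by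
  intro fuel
  induction fuel with
  | zero => intro r u h; omega
  | succ f ih =>
    intro r u h
    rw [pvFindJ]
    by_cases hjn : (r.length : Int) < n
    · rw [if_pos hjn]
      cases u with
      | nil =>
        have hnone : PySem.List.pyGet? (r ++ ([] : List Int)) (r.length : Int) = none := by
          simp [PySem.List.pyGet?_natCast]
        rw [hnone]
        simp
      | cons y u' =>
        have hget : PySem.List.pyGet? (r ++ y :: u') (r.length : Int) = some y :=
          PySem.List.pyGet?_append_length r u' y
        rw [hget]
        dsimp only
        have hm : (n - (r.length : Int)).toNat = ((n - ((r.length : Int) + 1)).toNat) + 1 := by omega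
        by_cases hp : pvAnd1 y == p
        · rw [if_pos hp]
          have hih := ih (r ++ [y]) u' (by simp at h ⊢; omega)
          have e1 : (r ++ [y]) ++ u' = r ++ y :: u' := by simp
          have e2 : (((r ++ [y]).length : Nat) : Int) = (r.length : Int) + 1 := by
            simp
          rw [e1, e2] at hih
          rw [hih, hm]
          rw [List.take_succ_cons, List.takeWhile_cons, if_pos hp]
          simp
          omega
        · rw [if_neg hp]
          rw [hm, List.take_succ_cons, List.takeWhile_cons, if_neg hp]
          simp
    · rw [if_neg hjn]
      have h0 : (n - (r.length : Int)).toNat = 0 := by omega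
      simp [h0]

lemma takeWhile_eq_take {p : Int → Bool} (l : List Int) :
    l.takeWhile p = l.take (l.takeWhile p).length := by
  exact List.prefix_iff_eq_take.mp (List.takeWhile_prefix p)

lemma dropWhile_eq_drop {p : Int → Bool} (l : List Int) :
    l.dropWhile p = l.drop (l.takeWhile p).length := by
  have h2 := List.take_append_drop (l.takeWhile p).length l
  rw [← takeWhile_eq_take] at h2
  have h := List.takeWhile_append_dropWhile (p := p) (l := l)
  exact List.append_cancel_left (h.trans h2.symm)

lemma outer_spec (n : Int) : ∀ (fuel : Nat) (s r : List Int), s.length < fuel →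
    n ≤ (r.length : Int) + s.length →
    pvOuter n fuel (r ++ s) (r.length : Int)
      = r ++ (pvGroups (s.take (n - r.length).toNat)).flatMap pvSortDesc ++ s.drop (n - r.length).toNat := by
  intro fuel
  induction fuel with
  | zero => intro s r h; omega
  | succ f ih =>
    intro s r h hn
    rw [pvOuter]
    by_cases hin : (r.length : Int) < n
    · rw [if_pos hin]
      cases s with
      | nil => exfalso; simp at hn; omega
      | cons x st =>
        have hget : PySem.List.pyGet? (r ++ x :: st) (r.length : Int) = some x :=
          PySem.List.pyGet?_append_length r st x
        rw [hget]
        dsimp only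
        have hm1 : 1 ≤ (n - (r.length : Int)).toNat := by omega
        set m : Nat := (n - (r.length : Int)).toNat with hmdef
        set pred : Int → Bool := fun y => pvAnd1 y == pvAnd1 x with hpreddef
        set tw : List Int := ((x :: st).take m).takeWhile pred with htwdef
        set t : Nat := tw.length with htdef
        have hpredx : pred x = true := by simp [hpreddef]
        have htw_cons : tw = x :: (st.take (m - 1)).takeWhile pred := by
          rw [htwdef]
          rw [show m = (m - 1) + 1 by omega, List.take_succ_cons, List.takeWhile_cons, if_pos hpredx]
          simp
        have ht1 : 1 ≤ t := by rw [htdef, htw_cons]; simp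
        have htle_m : t ≤ m := by
          have hl := (List.takeWhile_prefix (l := (x :: st).take m) pred).length_le
          rw [← htwdef, ← htdef] at hl
          simp at hl
          omega
        have htle_s : t ≤ (x :: st).length := by
          have hl := (List.takeWhile_prefix (l := (x :: st).take m) pred).length_le
          rw [← htwdef, ← htdef] at hl
          simp at hl
          omega
        have hfind : pvFindJ (r ++ x :: st) n (pvAnd1 x) ((r ++ x :: st).length + 1) (r.length : Int)
            = (r.length : Int) + (t : Int) := by
          rw [findJ_spec n (pvAnd1 x) ((r ++ x :: st).length + 1) r (x :: st) (by simp)]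
        rw [hfind]
        have htw_take : (x :: st).take t = tw := by
          rw [htwdef, takeWhile_eq_take, List.take_take, ← htwdef, ← htdef]
          congr 1
          omega
        have hslice : PySem.List.slice (r ++ x :: st) (some (r.length : Int))
            (some ((r.length : Int) + (t : Int))) = tw := by
          rw [PySem.List.slice_natCast_add, List.drop_left, htw_take]
        rw [hslice]
        have htake : (r ++ x :: st).take ((r.length : Int)).toNat = r := by
          simp
        have hdrop : (r ++ x :: st).drop ((r.length : Int) + (t : Int)).toNat = (x :: st).drop t := by
          have e : ((r.length : Int) + (t : Int)).toNat = r.length + t := by omega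
          rw [e, ← List.drop_drop, List.drop_left]
        rw [htake, hdrop]
        have hs'len : ((x :: st).drop t).length = (x :: st).length - t := by simp
        have hr'len : (r ++ pvSortDesc tw).length = r.length + t := by
          simp [pvSortDesc, PySem.List.length_sorted, htdef]
        have hih := ih ((x :: st).drop t) (r ++ pvSortDesc tw)
          (by rw [hs'len]; omega)
          (by rw [hr'len, hs'len]; omega)
        have e1 : (r ++ pvSortDesc tw) ++ (x :: st).drop t
            = r ++ pvSortDesc tw ++ (x :: st).drop t := by simp
        have e2 : (((r ++ pvSortDesc tw).length : Nat) : Int) = (r.length : Int) + (t : Int) := by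
          rw [hr'len]; push_cast; ring
        rw [e2] at hih
        rw [← e1, hih]
        have hgroups : pvGroups ((x :: st).take m)
            = tw :: pvGroups (((x :: st).drop t).take (m - t)) := by
          rw [show m = (m - 1) + 1 by omega, List.take_succ_cons, pvGroups, ← hpreddef]
          rw [← show m = (m - 1) + 1 by omega]
          congr 1
          · rw [htw_cons]
          · congr 1
            rw [dropWhile_eq_drop]
            have htl : ((st.take (m - 1)).takeWhile pred).length = t - 1 := by
              have : tw.length = ((st.take (m-1)).takeWhile pred).length + 1 := by
                rw [htw_cons]; simp
              omega
            rw [htl, List.drop_take]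
            rw [show (x :: st).drop t = st.drop (t - 1) by
              rw [show t = (t - 1) + 1 by omega, List.drop_succ_cons]; simp]
            congr 1
            omega
        have hmt : (n - ((r.length : Int) + (t : Int))).toNat = m - t := by omega
        rw [hmt] at hih ⊢
        rw [hgroups]
        have hdrops2 : ((x :: st).drop t).drop (m - t) = (x :: st).drop m := by
          rw [List.drop_drop]
          congr 1
          omega
        rw [hdrops2]
        simp [pvSortDesc]
    · rw [if_neg hin]
      have h0 : (n - (r.length : Int)).toNat = 0 := by omega
      simp [h0, pvGroups]

lemma groups_flatMap_length (l : List Int) :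
    ((pvGroups l).flatMap pvSortDesc).length = l.length := by
  induction l using pvGroups.induct with
  | case1 => simp [pvGroups]
  | case2 x xs ih =>
    rw [pvGroups]
    have h := congrArg List.length
      (List.takeWhile_append_dropWhile (p := fun y => pvAnd1 y == pvAnd1 x) (l := xs))
    simp only [List.length_append] at h
    simp only [List.flatMap_cons, List.length_append, ih, pvSortDesc,
      PySem.List.length_sorted, List.length_cons]
    omega

lemma prefix_eq (a : List Int) (n : Int) (h : n ≤ (a.length : Int)) :
    (PySem.List.pyRange 0 n 1).map (fun i => PySem.List.pyGetD a i 0) = a.take n.toNat := by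
  by_cases hn : n ≤ 0
  · rw [PySem.List.pyRange_one_eq_nil hn]
    have h0 : n.toNat = 0 := by omega
    simp [h0]
  · rw [PySem.List.pyRange_one 0 n]
    rw [List.map_map]
    apply List.ext_getElem
    · simp
      omega
    · intro k h1 h2
      simp only [List.getElem_map, List.getElem_range, Function.comp_apply]
      have hk : k < a.length := by
        simp at h1
        omega
      have e : (0 : Int) + (k : Int) = ((k : Nat) : Int) := by ring
      rw [e, PySem.List.pyGetD_natCast, List.getElem_take]
      simp [List.getD_eq_getElem?_getD, List.getElem?_eq_getElem hk]

-- B's insertion loop is exactly stable descending insertion of one element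
lemma insertDesc_eq_insertBy (x : Int) : ∀ l : List Int,
    pvInsertDesc x l = PySem.List.insertBy (fun a b => decide (b < a)) x l := by
  intro l
  induction l with
  | nil => rfl
  | cons y ys ih =>
    rw [pvInsertDesc, PySem.List.insertBy]
    by_cases h : x ≤ y
    · rw [if_pos h, if_neg (by simp; omega), ih]
    · rw [if_neg h, if_pos (by simp; omega)]

lemma insertDesc_sorted (x : Int) (g : List Int) :
    pvInsertDesc x (pvSortDesc g) = pvSortDesc (g ++ [x]) := by
  rw [pvSortDesc, pvSortDesc, PySem.List.sorted_rev_eq_foldl_insertBy,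
    PySem.List.sorted_rev_eq_foldl_insertBy, List.foldl_append, List.foldl_cons, List.foldl_nil,
    insertDesc_eq_insertBy]

lemma takeWhile_all {p : Int → Bool} : ∀ (t : List Int), (∀ y ∈ t, p y) → t.takeWhile p = t := by
  intro t
  induction t with
  | nil => intro _; rfl
  | cons y ys ih =>
    intro h
    rw [List.takeWhile_cons, if_pos (h y (by simp))]
    rw [ih (fun z hz => h z (by simp [hz]))]

lemma takeWhile_all_append {p : Int → Bool} : ∀ (t u : List Int), (∀ y ∈ t, p y) →
    (t ++ u).takeWhile p = t ++ u.takeWhile p := by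
  intro t
  induction t with
  | nil => intro u _; rfl
  | cons y ys ih =>
    intro u h
    rw [List.cons_append, List.takeWhile_cons, if_pos (h y (by simp))]
    rw [ih u (fun z hz => h z (by simp [hz]))]
    simp

lemma dropWhile_all_append {p : Int → Bool} : ∀ (t u : List Int), (∀ y ∈ t, p y) →
    (t ++ u).dropWhile p = u.dropWhile p := by
  intro t
  induction t with
  | nil => intro u _; rfl
  | cons y ys ih =>
    intro u h
    rw [List.cons_append, List.dropWhile_cons, if_pos (h y (by simp))]
    exact ih u (fun z hz => h z (by simp [hz]))

lemma groups_singleton (p : Int) (x : Int) (t : List Int)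
    (hall : ∀ y ∈ x :: t, pvAnd1 y = p) : pvGroups (x :: t) = [x :: t] := by
  rw [pvGroups]
  have hx : pvAnd1 x = p := hall x (by simp)
  have ht : ∀ y ∈ t, (fun y => pvAnd1 y == pvAnd1 x) y = true := by
    intro y hy
    simp [hall y (by simp [hy]), hx]
  rw [takeWhile_all t ht]
  have hd : t.dropWhile (fun y => pvAnd1 y == pvAnd1 x) = [] := by
    rw [dropWhile_eq_drop, takeWhile_all t ht]
    simp
  rw [hd, pvGroups]

lemma groups_append (p : Int) (h : Int) (t : List Int) (x : Int) (xs : List Int)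
    (hall : ∀ y ∈ h :: t, pvAnd1 y = p) (hx : pvAnd1 x ≠ p) :
    pvGroups ((h :: t) ++ x :: xs) = (h :: t) :: pvGroups (x :: xs) := by
  rw [List.cons_append, pvGroups]
  have hh : pvAnd1 h = p := hall h (by simp)
  have ht : ∀ y ∈ t, (fun y => pvAnd1 y == pvAnd1 h) y = true := by
    intro y hy
    simp [hall y (by simp [hy]), hh]
  have hpx : (pvAnd1 x == pvAnd1 h) = false := by
    simp [hh]
    exact hx
  rw [takeWhile_all_append t (x :: xs) ht, dropWhile_all_append t (x :: xs) ht]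
  simp [hpx]

-- loop invariant of B's pass: with the current run the descending sort of a nonempty
-- same-parity block g, finishing the fold yields done ++ the sorted runs of g ++ l
lemma step_run : ∀ (l done g : List Int) (p : Int), g ≠ [] → (∀ y ∈ g, pvAnd1 y = p) →
    (l.foldl pvStep (done, pvSortDesc g)).1 ++ (l.foldl pvStep (done, pvSortDesc g)).2
      = done ++ (pvGroups (g ++ l)).flatMap pvSortDesc := by
  intro l
  induction l with
  | nil =>
    intro done g p hg hall
    cases g with
    | nil => exact absurd rfl hg
    | cons h t =>
      rw [List.foldl_nil, List.append_nil, groups_singleton p h t hall]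
      simp
  | cons x xs ih =>
    intro done g p hg hall
    rw [List.foldl_cons]
    have hne : pvSortDesc g ≠ [] := by
      rw [pvSortDesc, Ne, PySem.List.sorted_eq_nil_iff]
      exact hg
    obtain ⟨r0, rt, hr⟩ := List.exists_cons_of_ne_nil hne
    have hr0 : pvAnd1 r0 = p := by
      have : r0 ∈ pvSortDesc g := by rw [hr]; simp
      rw [pvSortDesc, PySem.List.mem_sorted] at this
      exact hall r0 this
    by_cases hxp : pvAnd1 x = p
    · have hstep : pvStep (done, pvSortDesc g) x = (done, pvSortDesc (g ++ [x])) := by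
        rw [pvStep, hr]
        simp only [hr0, hxp, ne_eq, not_true_eq_false, ite_false]
        rw [← hr, insertDesc_sorted]
      rw [hstep, ih done (g ++ [x]) p (by simp)
        (by intro y hy; rcases List.mem_append.mp hy with h1 | h1
            · exact hall y h1
            · simp at h1; rw [h1]; exact hxp)]
      congr 2
      simp
    · have hstep : pvStep (done, pvSortDesc g) x = (done ++ pvSortDesc g, pvSortDesc [x]) := by
        rw [pvStep, hr]
        simp only [hr0]
        rw [if_pos (show ¬ p = pvAnd1 x from fun h => hxp h.symm)]
        rfl
      rw [hstep, ih (done ++ pvSortDesc g) [x] (pvAnd1 x) (by simp)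
        (by intro y hy; simp at hy; rw [hy])]
      cases g with
      | nil => exact absurd rfl hg
      | cons h t =>
        rw [groups_append p h t x xs hall hxp]
        simp

lemma finish_eq (l : List Int) :
    (l.foldl pvStep (([] : List Int), ([] : List Int))).1
      ++ (l.foldl pvStep (([] : List Int), ([] : List Int))).2
      = (pvGroups l).flatMap pvSortDesc := by
  cases l with
  | nil => simp [pvGroups]
  | cons x xs =>
    rw [List.foldl_cons]
    have hstep : pvStep (([] : List Int), ([] : List Int)) x = ([], pvSortDesc [x]) := rfl
    rw [hstep]
    have := step_run xs [] [x] (pvAnd1 x) (by simp) (by intro y hy; simp at hy; rw [hy])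
    simpa using this

-- ===== VERDICT (by name: the statement is the Claim_ definition above) =====
theorem lexicographicallyLargest_spec : Claim_equal_lexicographicallyLargest := by
  intro a n _hDom hPre'
  have hPre : n ≤ (a.length : Int) := hPre'
  unfold Spec_lexicographicallyLargest lexicographicallyLargest lexicographicallyLargest_alt
  have h0 : pvOuter n (a.length + 1) a 0
      = pvOuter n (a.length + 1) (([] : List Int) ++ a) (((List.nil (α := Int)).length : Int)) := by simp
  rw [h0, outer_spec n (a.length + 1) a [] (by omega) (by simpa using hPre)]
  rw [prefix_eq a n hPre]
  have hfin := finish_eq (a.take n.toNat)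
  have hlen : ((pvGroups (a.take n.toNat)).flatMap pvSortDesc).length = n.toNat := by
    rw [groups_flatMap_length]
    simp
    omega
  simp only [hfin]
  simp [hlen]
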